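-- pv_equiv track=rewrite | github.com/primalrun/hilton_work | data_profile/data_profile_combine_profile_results.py | get_value_with_max_length_of_characters
-- ===== SOURCE A (Python) =====
-- def get_value_with_max_length_of_characters(value_list):
--     string_list = [elem for elem in value_list if isinstance(elem, str)]
--     no_null_list = [x for x in string_list if x != '']
--     len_list = [len(x) for x in no_null_list]
--     if len(len_list) > 0 and len(no_null_list) > 0:
--         highest_len = max(len_list)
--         highest_len_index = len_list.index(highest_len)
--         highest_max_len_string = no_null_list[highest_len_index]
--         return highest_max_len_string
--     else:
--         return None
-- ===== SOURCE B (Python) =====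
-- def get_value_with_max_length_of_characters(value_list):
--     best = None
--     best_len = 0
--     for elem in value_list:
--         if isinstance(elem, str) and elem != '' and len(elem) > best_len:
--             best = elem
--             best_len = len(elem)
--     return best
-- ===== Notes on version B (the rewrite author's own statement) =====
-- stated objective: simpler
-- what changed: Replaced the three intermediate lists (filtered strings, non-empty strings, lengths) and the max+index+lookup with a single accumulator loop that keeps the first longest non-empty string seen so far (strict > preserves the first-wins tie rule).
import Mathlib
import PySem

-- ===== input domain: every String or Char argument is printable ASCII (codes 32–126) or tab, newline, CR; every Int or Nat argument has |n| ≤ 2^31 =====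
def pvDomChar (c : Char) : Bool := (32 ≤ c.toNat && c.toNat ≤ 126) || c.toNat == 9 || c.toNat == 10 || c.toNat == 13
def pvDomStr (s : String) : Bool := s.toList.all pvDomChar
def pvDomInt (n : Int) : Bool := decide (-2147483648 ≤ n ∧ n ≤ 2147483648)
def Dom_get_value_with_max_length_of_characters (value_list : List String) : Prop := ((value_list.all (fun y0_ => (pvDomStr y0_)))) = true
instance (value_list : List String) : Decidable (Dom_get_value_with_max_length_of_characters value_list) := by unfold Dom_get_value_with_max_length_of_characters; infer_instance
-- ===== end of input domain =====

-- B replaces A's three temporary lists and the max/index/lookup with one first-longest accumulator loop (simpler; same O(n) cost).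

-- ===== PORT A =====
-- isinstance(elem, str) is always true on the declared type List String, so string_list = value_list.
def get_value_with_max_length_of_characters (value_list : List String) : Option String :=
  let string_list := value_list
  let no_null_list := string_list.filter (fun x => x ≠ "")
  let len_list := no_null_list.map PySem.Str.len
  if 0 < len_list.length ∧ 0 < no_null_list.length then
    match PySem.List.max? len_list id with
    | some highest_len =>
      match PySem.List.index? len_list highest_len with
      | some highest_len_index => PySem.List.pyGet? no_null_list (highest_len_index : Int)
      | none => none   -- unreachable: the max is in the list
    | none => none     -- unreachable: len_list is non-empty here
  else
    none

-- ===== PORT B =====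
-- the loop body: if isinstance(elem, str) and elem != '' and len(elem) > best_len: update (best, best_len)
def pvStepB (acc : Option String × Int) (elem : String) : Option String × Int :=
  if elem ≠ "" ∧ acc.2 < PySem.Str.len elem then (some elem, PySem.Str.len elem) else acc

def get_value_with_max_length_of_characters_alt (value_list : List String) : Option String :=
  (value_list.foldl pvStepB ((none : Option String), (0 : Int))).1

-- ===== PRECONDITION & SPEC =====
def Spec_get_value_with_max_length_of_characters (value_list : List String) (out : Option String) : Prop := out = get_value_with_max_length_of_characters_alt value_list
instance (value_list : List String) (out : Option String) : Decidable (Spec_get_value_with_max_length_of_characters value_list out) := by unfold Spec_get_value_with_max_length_of_characters; infer_instance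

-- ===== CLAIM (what is proved, stated in full; the proofs are below) =====
def Claim_equal_get_value_with_max_length_of_characters : Prop := ∀ (value_list : List String), Dom_get_value_with_max_length_of_characters value_list → Spec_get_value_with_max_length_of_characters value_list (get_value_with_max_length_of_characters value_list)

-- ===== LEMMAS AND PROOFS =====

-- "first longest" combining function: keep the earlier element on ties (strict <)
def pvPick (b y : String) : String := if PySem.Str.len b < PySem.Str.len y then y else b

theorem pvLen_pos (x : String) (h : x ≠ "") : 0 < PySem.Str.len x := by
  have hnil : x.toList ≠ [] := fun hnil => h (by simpa [String.toList_inj] using hnil)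
  have := List.length_pos_iff.mpr hnil
  show (0:Int) < ↑x.toList.length
  omega

-- B's fold ignores empty strings, so it equals the fold over the filtered list
theorem pvFoldB_filter (vl : List String) (acc : Option String × Int) :
    List.foldl pvStepB acc vl = List.foldl pvStepB acc (vl.filter (fun x => x ≠ "")) := by
  rw [List.foldl_filter]
  induction vl generalizing acc with
  | nil => rfl
  | cons x xs ih =>
    simp only [List.foldl]
    rw [ih]
    congr 1
    by_cases hx : x = "" <;> simp [pvStepB, hx]

-- once the accumulator holds a real string, B's fold computes pvPick
theorem pvPick_pos (b y : String) (h : PySem.Str.len b < PySem.Str.len y) : pvPick b y = y := if_pos h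

theorem pvPick_neg (b y : String) (h : ¬ PySem.Str.len b < PySem.Str.len y) : pvPick b y = b := if_neg h

theorem pvFoldB_run (xs : List String) (b : String) (hxs : ∀ x ∈ xs, x ≠ "") :
    List.foldl pvStepB (some b, PySem.Str.len b) xs
      = (some (List.foldl pvPick b xs), PySem.Str.len (List.foldl pvPick b xs)) := by
  induction xs generalizing b with
  | nil => rfl
  | cons y ys ih =>
    have hy : y ≠ "" := hxs y (by simp)
    have hstep : pvStepB (some b, PySem.Str.len b) y = (some (pvPick b y), PySem.Str.len (pvPick b y)) := by
      unfold pvStepB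
      by_cases h : PySem.Str.len b < PySem.Str.len y
      · rw [if_pos ⟨hy, h⟩, pvPick_pos b y h]
      · rw [if_neg (fun hc => h hc.2), pvPick_neg b y h]
    simp only [List.foldl, hstep]
    exact ih (pvPick b y) (fun x hx => hxs x (by simp [hx]))

theorem pvPick_le (xs : List String) (x : String) :
    PySem.Str.len x ≤ PySem.Str.len (List.foldl pvPick x xs) := by
  induction xs generalizing x with
  | nil => simp
  | cons y ys ih =>
    have h1 : PySem.Str.len x ≤ PySem.Str.len (pvPick x y) := by
      by_cases h : PySem.Str.len x < PySem.Str.len y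
      · rw [pvPick_pos x y h]; exact le_of_lt h
      · rw [pvPick_neg x y h]
    exact le_trans h1 (ih (pvPick x y))

-- A's max over the lengths is the length of the fold-picked element
def pvMaxStep (acc : Option Int) (v : Int) : Option Int :=
  match acc with
  | none => some v
  | some m => if m < v then some v else some m

theorem pvMaxStep_aux (xs : List String) (x : String) :
    List.foldl pvMaxStep (some (PySem.Str.len x)) (xs.map PySem.Str.len)
      = some (PySem.Str.len (List.foldl pvPick x xs)) := by
  induction xs generalizing x with
  | nil => rfl
  | cons y ys ih =>
    simp only [List.map, List.foldl, pvMaxStep]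
    by_cases h : PySem.Str.len x < PySem.Str.len y
    · rw [if_pos h, pvPick_pos x y h]
      exact ih y
    · rw [if_neg h, pvPick_neg x y h]
      exact ih x

theorem pvMax_eq (xs : List String) (x : String) :
    PySem.List.max? ((x :: xs).map PySem.Str.len) id
      = some (PySem.Str.len (List.foldl pvPick x xs)) := by
  have hfun : PySem.List.max? ((x :: xs).map PySem.Str.len) id
      = List.foldl pvMaxStep none ((x :: xs).map PySem.Str.len) := by
    unfold PySem.List.max?
    congr 1
    funext acc v
    cases acc <;> rfl
  rw [hfun]
  simp only [List.map, List.foldl, pvMaxStep]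
  exact pvMaxStep_aux xs x

-- the fold-picked element is the FIRST element of maximal length
theorem pvFind_eq (xs : List String) (x : String) :
    (x :: xs).find? (fun y => PySem.Str.len y == PySem.Str.len (List.foldl pvPick x xs))
      = some (List.foldl pvPick x xs) := by
  induction xs generalizing x with
  | nil => exact List.find?_cons_of_pos (p := fun y => PySem.Str.len y == PySem.Str.len (List.foldl pvPick x [])) (by simp)
  | cons y ys ih =>
    have hfold : List.foldl pvPick x (y :: ys) = List.foldl pvPick (pvPick x y) ys := rfl
    by_cases h : PySem.Str.len x < PySem.Str.len y
    · have hpick : pvPick x y = y := pvPick_pos x y h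
      have hxlt : PySem.Str.len x < PySem.Str.len (List.foldl pvPick x (y :: ys)) := by
        rw [hfold, hpick]
        exact lt_of_lt_of_le h (pvPick_le ys y)
      rw [List.find?_cons_of_neg (p := fun z => PySem.Str.len z == PySem.Str.len (List.foldl pvPick x (y :: ys))) (a := x)
            (by simpa only [beq_iff_eq] using ne_of_lt hxlt)]
      rw [hfold, hpick]
      exact ih y
    · have hpick : pvPick x y = x := pvPick_neg x y h
      rw [hfold, hpick]
      have ih' := ih x
      have hxle : PySem.Str.len x ≤ PySem.Str.len (List.foldl pvPick x ys) := pvPick_le ys x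
      by_cases hx : (PySem.Str.len x == PySem.Str.len (List.foldl pvPick x ys)) = true
      · rw [List.find?_cons_of_pos (p := fun z => PySem.Str.len z == PySem.Str.len (List.foldl pvPick x ys)) (a := x) hx]
        rw [List.find?_cons_of_pos (p := fun z => PySem.Str.len z == PySem.Str.len (List.foldl pvPick x ys)) (a := x) hx] at ih'
        exact ih'
      · rw [List.find?_cons_of_neg (p := fun z => PySem.Str.len z == PySem.Str.len (List.foldl pvPick x ys)) (a := x) hx] at ih'
        have hxlt : PySem.Str.len x < PySem.Str.len (List.foldl pvPick x ys) := by
          rcases lt_or_eq_of_le hxle with hlt | heq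
          · exact hlt
          · exact absurd (by simpa only [beq_iff_eq] using heq) hx
        have hpy : ¬ (PySem.Str.len y == PySem.Str.len (List.foldl pvPick x ys)) = true := by
          simp only [beq_iff_eq]
          exact ne_of_lt (lt_of_le_of_lt (le_of_not_gt h) hxlt)
        rw [List.find?_cons_of_neg (p := fun z => PySem.Str.len z == PySem.Str.len (List.foldl pvPick x ys)) (a := x) hx,
            List.find?_cons_of_neg (p := fun z => PySem.Str.len z == PySem.Str.len (List.foldl pvPick x ys)) (a := y) hpy]
        exact ih'

-- index?-then-pyGet? over the length list is find? over the string list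
theorem pvGet_succ (i : Nat) (x : String) (xs : List String) :
    PySem.List.pyGet? (x :: xs) ((i+1 : Nat) : Int) = PySem.List.pyGet? xs (i : Nat) := by
  simp [PySem.List.pyGet?, PySem.List.pyIdx?]
  split_ifs <;> simp_all <;> omega

theorem pvIndexGet_eq_find (l : List String) (v : Int) :
    (match PySem.List.index? (l.map PySem.Str.len) v with
     | some i => PySem.List.pyGet? l (i : Int)
     | none => none)
      = l.find? (fun y => PySem.Str.len y == v) := by
  induction l with
  | nil => rfl
  | cons x xs ih =>
    simp only [PySem.List.index?, List.map] at *
    rw [List.idxOf?_cons]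
    by_cases hx : (PySem.Str.len x == v) = true
    · rw [if_pos hx, List.find?_cons_of_pos (p := fun y => PySem.Str.len y == v) (a := x) hx]
      simp [PySem.List.pyGet?, PySem.List.pyIdx?]
    · rw [if_neg hx, List.find?_cons_of_neg (p := fun y => PySem.Str.len y == v) (a := x) hx, ← ih]
      cases h : List.idxOf? v (xs.map PySem.Str.len) with
      | none => simp
      | some i =>
        simp only [Option.map_some]
        exact pvGet_succ i x xs

-- ===== VERDICT (by name: the statement is the Claim_ definition above) =====
theorem get_value_with_max_length_of_characters_spec : Claim_equal_get_value_with_max_length_of_characters := by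
  intro vl _hdom
  unfold Spec_get_value_with_max_length_of_characters
  unfold get_value_with_max_length_of_characters get_value_with_max_length_of_characters_alt
  rw [pvFoldB_filter]
  show (if 0 < (List.map PySem.Str.len (vl.filter (fun x => x ≠ ""))).length ∧ 0 < (vl.filter (fun x => x ≠ "")).length then
      match PySem.List.max? (List.map PySem.Str.len (vl.filter (fun x => x ≠ ""))) id with
      | some highest_len =>
        match PySem.List.index? (List.map PySem.Str.len (vl.filter (fun x => x ≠ ""))) highest_len with
        | some highest_len_index => PySem.List.pyGet? (vl.filter (fun x => x ≠ "")) (highest_len_index : Int)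
        | none => none
      | none => none
    else none) = (List.foldl pvStepB (none, 0) (vl.filter (fun x => x ≠ ""))).1
  cases hL : vl.filter (fun x => x ≠ "") with
  | nil => simp
  | cons x xs =>
    have hmem : ∀ y ∈ x :: xs, y ≠ "" := by
      intro y hy
      have := List.mem_filter.mp (hL ▸ hy)
      simpa using this.2
    have hx : x ≠ "" := hmem x (by simp)
    rw [if_pos (by simp)]
    rw [pvMax_eq xs x]
    show (match PySem.List.index? (List.map PySem.Str.len (x :: xs)) (PySem.Str.len (List.foldl pvPick x xs)) with
          | some highest_len_index => PySem.List.pyGet? (x :: xs) (highest_len_index : Int)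
          | none => none)
        = (List.foldl pvStepB (none, 0) (x :: xs)).1
    rw [pvIndexGet_eq_find, pvFind_eq]
    have hstep0 : pvStepB ((none : Option String), (0 : Int)) x = (some x, PySem.Str.len x) := by
      unfold pvStepB
      rw [if_pos ⟨hx, pvLen_pos x hx⟩]
    show some (List.foldl pvPick x xs) = (List.foldl pvStepB (pvStepB (none, 0) x) xs).1
    rw [hstep0, pvFoldB_run xs x (fun y hy => hmem y (List.mem_cons_of_mem x hy))]
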